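-- pv_equiv track=rewrite | github.com/AngHY07/PRG-projects | Mini Task 03/Incredible Cookies.py | calculate_cookie_score
-- ===== SOURCE A (Python) =====
-- def calculate_cookie_score(ingredients):
--     score_local = 0
--     for x in ingredients:
--         if x == "sugar":
--             score_local += 5
--         elif x == "butter":
--             score_local += 4
--         elif x == "chocolatechips":
--             score_local += 3
--         elif x == "flour":
--             score_local -= 2
--         else:
--             score_local += 1
--     return score_local
-- ===== SOURCE B (Python) =====
-- def calculate_cookie_score(ingredients):
--     counts = {}
--     for x in ingredients:
--         counts[x] = counts.get(x, 0) + 1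
--     s = counts.get("sugar", 0)
--     b = counts.get("butter", 0)
--     c = counts.get("chocolatechips", 0)
--     f = counts.get("flour", 0)
--     total = len(ingredients)
--     return 5 * s + 4 * b + 3 * c - 2 * f + (total - (s + b + c + f))
-- ===== Notes on version B (the rewrite author's own statement) =====
-- stated objective: alternative
-- what changed: Replaces the per-element branch chain with a frequency table built in one pass (dict counting) followed by constant-time arithmetic over the four named counts plus weight 1 for everything else.
import Mathlib
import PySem

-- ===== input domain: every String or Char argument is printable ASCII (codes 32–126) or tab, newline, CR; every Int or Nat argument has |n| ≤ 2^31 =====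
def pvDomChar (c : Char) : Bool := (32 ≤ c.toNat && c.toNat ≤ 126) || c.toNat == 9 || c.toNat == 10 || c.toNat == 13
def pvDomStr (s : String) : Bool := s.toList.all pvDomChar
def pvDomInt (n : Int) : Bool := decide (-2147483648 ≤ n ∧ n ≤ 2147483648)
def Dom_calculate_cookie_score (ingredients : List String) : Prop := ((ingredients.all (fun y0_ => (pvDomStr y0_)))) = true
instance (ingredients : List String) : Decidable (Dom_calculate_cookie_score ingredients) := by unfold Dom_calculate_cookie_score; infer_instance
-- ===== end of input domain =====

-- B replaces A's per-element branch chain by a one-pass frequency table (dict counting) followed by constant-time weighted arithmetic over the counts (alternative decomposition, same O(n) cost).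


-- ===== PORT A =====
def calculate_cookie_score (ingredients : List String) : Int :=
  ingredients.foldl (fun score_local x =>
    if x == "sugar" then score_local + 5
    else if x == "butter" then score_local + 4
    else if x == "chocolatechips" then score_local + 3
    else if x == "flour" then score_local - 2
    else score_local + 1) 0

-- ===== PORT B =====
def calculate_cookie_score_alt (ingredients : List String) : Int :=
  let counts : PySem.Dict String Int :=
    ingredients.foldl (fun d x => d.insert x (d.getD x 0 + 1)) PySem.Dict.empty
  let s := counts.getD "sugar" 0
  let b := counts.getD "butter" 0
  let c := counts.getD "chocolatechips" 0
  let f := counts.getD "flour" 0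
  let total := PySem.List.len ingredients
  5 * s + 4 * b + 3 * c - 2 * f + (total - (s + b + c + f))

-- ===== PRECONDITION & SPEC =====
def Spec_calculate_cookie_score (ingredients : List String) (out : Int) : Prop := out = calculate_cookie_score_alt ingredients
instance (ingredients : List String) (out : Int) : Decidable (Spec_calculate_cookie_score ingredients out) := by unfold Spec_calculate_cookie_score; infer_instance

-- ===== CLAIM (what is proved, stated in full; the proofs are below) =====
def Claim_equal_calculate_cookie_score : Prop := ∀ (ingredients : List String), Dom_calculate_cookie_score ingredients → Spec_calculate_cookie_score ingredients (calculate_cookie_score ingredients)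

-- ===== LEMMAS AND PROOFS =====

-- A's loop, from any accumulator, adds the weighted-count closed form.
lemma loopA_closed (xs : List String) (acc : Int) :
    xs.foldl (fun score_local x =>
      if x == "sugar" then score_local + 5
      else if x == "butter" then score_local + 4
      else if x == "chocolatechips" then score_local + 3
      else if x == "flour" then score_local - 2
      else score_local + 1) acc
    = acc + 5 * (xs.count "sugar") + 4 * (xs.count "butter")
        + 3 * (xs.count "chocolatechips") - 2 * (xs.count "flour")
        + ((xs.length : Int) - ((xs.count "sugar") + (xs.count "butter")
            + (xs.count "chocolatechips") + (xs.count "flour"))) := by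
  induction xs generalizing acc with
  | nil => simp
  | cons x xs ih =>
    by_cases h1 : x = "sugar" <;> by_cases h2 : x = "butter" <;>
      by_cases h3 : x = "chocolatechips" <;> by_cases h4 : x = "flour" <;>
      simp_all [List.count_cons, ih] <;> try (push_cast; ring)

-- ===== VERDICT (by name: the statement is the Claim_ definition above) =====
theorem calculate_cookie_score_spec : Claim_equal_calculate_cookie_score := by
  intro ingredients _
  unfold Spec_calculate_cookie_score calculate_cookie_score calculate_cookie_score_alt
  rw [loopA_closed]
  simp [PySem.Dict.getD_foldl_insert_add_one, PySem.List.len_eq]
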